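-- pv_equiv track=rewrite | github.com/Obelix3000/EBM-Strategy-Converter | src/reorder.py | _interlaced_block_reorder
-- ===== SOURCE A (Python) =====
-- def _interlaced_block_reorder(stripe_idx: list, forward_jump: int, backward_jump: int) -> list:
--     """Wendet das modulare Sprungmuster blockweise auf einen Streifen an."""
--     block_size = forward_jump + backward_jump
--     full_order = _build_modular_order(block_size, forward_jump)
--     result = []
--     for block_start in range(0, len(stripe_idx), block_size):
--         block = stripe_idx[block_start:block_start + block_size]
--         filtered = [pos for pos in full_order if pos < len(block)]
--         result.extend(block[pos] for pos in filtered)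
--     return result
--
-- def _build_modular_order(block_size: int, forward_jump: int) -> list:
--     """Baut die deterministische modulare Besuchsreihenfolge für einen Block auf.
--     Startet bei 0, springt jeweils um forward_jump (mod block_size) weiter."""
--     seen: set = set()
--     order: list = []
--     for start in range(block_size):
--         if start in seen:
--             continue
--         cur = start
--         while cur not in seen:
--             seen.add(cur)
--             order.append(cur)
--             cur = (cur + forward_jump) % block_size
--     return order
-- ===== SOURCE B (Python) =====
-- def _interlaced_block_reorder(stripe_idx: list, forward_jump: int, backward_jump: int) -> list:
--     block_size = forward_jump + backward_jump
--     if block_size <= 0: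
--         return []
--     # cycle decomposition: g = gcd(|forward_jump|, block_size) cycles, each of length block_size // g,
--     # written in closed form -- no visited-set bookkeeping
--     a, b = abs(forward_jump), block_size
--     while b:
--         a, b = b, a % b
--     g = a
--     cycle_len = block_size // g
--     order = [(r + k * forward_jump) % block_size
--              for r in range(g)
--              for k in range(cycle_len)]
--     result = []
--     for block_start in range(0, len(stripe_idx), block_size):
--         block = stripe_idx[block_start:block_start + block_size]
--         result.extend(block[pos] for pos in order if pos < len(block))
--     return result
-- ===== Notes on version B (the rewrite author's own statement) =====
-- stated objective: alternative
-- what changed: Replaces the seen-set walk over all block positions with a gcd-based cycle decomposition: g = gcd(|forward_jump|, block_size) and the visit order is emitted in closed form as [(r + k*forward_jump) % block_size for r in range(g) for k in range(block_size//g)], with no visited-set bookkeeping; block_size <= 0 short-circuits to [].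
import Mathlib
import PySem

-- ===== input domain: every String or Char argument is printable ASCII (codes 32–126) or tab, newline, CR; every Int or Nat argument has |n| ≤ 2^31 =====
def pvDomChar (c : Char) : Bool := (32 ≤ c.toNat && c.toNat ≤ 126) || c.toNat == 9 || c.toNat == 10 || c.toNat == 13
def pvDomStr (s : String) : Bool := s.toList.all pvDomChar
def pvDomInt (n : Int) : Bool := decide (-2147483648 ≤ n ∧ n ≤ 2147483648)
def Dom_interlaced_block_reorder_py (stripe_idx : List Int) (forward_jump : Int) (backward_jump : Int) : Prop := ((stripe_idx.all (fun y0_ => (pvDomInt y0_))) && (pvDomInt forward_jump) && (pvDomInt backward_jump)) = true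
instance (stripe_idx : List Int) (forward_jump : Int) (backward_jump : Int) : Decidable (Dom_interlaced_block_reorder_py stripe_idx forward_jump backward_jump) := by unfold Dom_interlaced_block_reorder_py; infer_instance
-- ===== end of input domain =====

-- B replaces A's seen-set walk with a closed-form gcd-based cycle decomposition of the same modular
-- jump permutation (objective: alternative; no visited-set bookkeeping, same blockwise slicing).

-- ===== PORT A =====
-- Python's 'seen: set' is used only for membership tests (never iterated), so Std.TreeSet Int is an
-- exact model of it; Python's list.append on 'order' is Array.push (result read off as .toList).
def pvWalkA (bs fj : Int) : Nat → Std.TreeSet Int → Array Int → Int → Std.TreeSet Int × Array Int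
  | 0, seen, order, _ => (seen, order)
  | n+1, seen, order, cur =>
    if seen.contains cur then (seen, order)
    else pvWalkA bs fj n (seen.insert cur) (order.push cur) (PySem.Int.mod (cur + fj) bs)
-- 'while cur not in seen': the loop visits at most block_size distinct values before repeating,
-- so fuel block_size.toNat + 1 makes the recursion total without changing its result.

def pvBuildModularOrder (block_size forward_jump : Int) : List Int :=
  (((PySem.List.pyRange 0 block_size 1).foldl
    (fun st start =>
      if st.1.contains start then st
      else pvWalkA block_size forward_jump (block_size.toNat + 1) st.1 st.2 start)
    ((∅ : Std.TreeSet Int), (#[] : Array Int))).2).toList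

def interlaced_block_reorder_py (stripe_idx : List Int) (forward_jump : Int) (backward_jump : Int) : List Int :=
  let block_size := forward_jump + backward_jump
  let full_order := pvBuildModularOrder block_size forward_jump
  (PySem.List.pyRange 0 (stripe_idx.length : Int) block_size).foldl
    (fun result block_start =>
      let block := PySem.List.slice stripe_idx (some block_start) (some (block_start + block_size))
      let filtered := full_order.filter (fun pos => pos < (block.length : Int))
      result ++ filtered.map (fun pos => PySem.List.pyGetD block pos 0))
    []

-- ===== PORT B =====
def pvEuclid (a b : Int) : Int :=
  if _h : b = 0 then a else pvEuclid b (PySem.Int.mod a b)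
termination_by b.natAbs
decreasing_by
  rcases lt_or_gt_of_ne _h with hb | hb
  · have h1 := PySem.Int.mod_neg_bounds (a := a) hb; omega
  · have h1 := PySem.Int.mod_nonneg (a := a) hb
    have h2 := PySem.Int.mod_lt (a := a) hb; omega

def interlaced_block_reorder_py_alt (stripe_idx : List Int) (forward_jump : Int) (backward_jump : Int) : List Int :=
  let block_size := forward_jump + backward_jump
  if block_size ≤ 0 then []
  else
    let g := pvEuclid (forward_jump.natAbs : Int) block_size
    let cycle_len := PySem.Int.floordiv block_size g
    let order := (PySem.List.pyRange 0 g 1).flatMap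
      (fun r => (PySem.List.pyRange 0 cycle_len 1).map
        (fun k => PySem.Int.mod (r + k * forward_jump) block_size))
    (PySem.List.pyRange 0 (stripe_idx.length : Int) block_size).foldl
      (fun result block_start =>
        let block := PySem.List.slice stripe_idx (some block_start) (some (block_start + block_size))
        let filtered := order.filter (fun pos => pos < (block.length : Int))
        result ++ filtered.map (fun pos => PySem.List.pyGetD block pos 0))
      []

-- ===== PRECONDITION & SPEC =====
-- Pre_ excludes exactly forward_jump + backward_jump = 0, where Python A raises ValueError
-- (range() step 0); A returns normally everywhere else.
def Pre_interlaced_block_reorder_py (stripe_idx : List Int) (forward_jump : Int) (backward_jump : Int) : Prop :=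
  forward_jump + backward_jump ≠ 0
instance (stripe_idx : List Int) (forward_jump : Int) (backward_jump : Int) : Decidable (Pre_interlaced_block_reorder_py stripe_idx forward_jump backward_jump) := by unfold Pre_interlaced_block_reorder_py; infer_instance

def pvWitness_interlaced_block_reorder_py : List Int × Int × Int := ([5, 1, 4, 2, 3, 7], 2, 1)

def Spec_interlaced_block_reorder_py (stripe_idx : List Int) (forward_jump : Int) (backward_jump : Int) (out : List Int) : Prop := out = interlaced_block_reorder_py_alt stripe_idx forward_jump backward_jump
instance (stripe_idx : List Int) (forward_jump : Int) (backward_jump : Int) (out : List Int) : Decidable (Spec_interlaced_block_reorder_py stripe_idx forward_jump backward_jump out) := by unfold Spec_interlaced_block_reorder_py; infer_instance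

-- ===== CLAIM (what is proved, stated in full; the proofs are below) =====
def Claim_equal_interlaced_block_reorder_py : Prop := ∀ (stripe_idx : List Int) (forward_jump : Int) (backward_jump : Int), Dom_interlaced_block_reorder_py stripe_idx forward_jump backward_jump → Pre_interlaced_block_reorder_py stripe_idx forward_jump backward_jump → Spec_interlaced_block_reorder_py stripe_idx forward_jump backward_jump (interlaced_block_reorder_py stripe_idx forward_jump backward_jump)
-- ===== LEMMAS AND PROOFS =====
def pvG (bs fj : Int) : Nat := Int.gcd fj bs
def pvC (bs fj : Int) : Nat := bs.toNat / pvG bs fj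
def pvElt (bs fj r : Int) (k : Nat) : Int := (r + (k : Int) * fj) % bs
def pvCyc (bs fj : Int) (c : Nat) (r : Int) : List Int := (List.range c).map (pvElt bs fj r)
def pvO (bs fj : Int) (c m : Nat) : List Int := ((List.range m).map (fun r : Nat => pvCyc bs fj c (r : Int))).flatten

theorem pvG_pos {bs fj : Int} (hbs : 0 < bs) : 0 < pvG bs fj := by
  unfold pvG; rw [Int.gcd_pos_iff]; right; omega

theorem pvG_dvd_bs (bs fj : Int) : ((pvG bs fj : Int)) ∣ bs := Int.gcd_dvd_right fj bs
theorem pvG_dvd_fj (bs fj : Int) : ((pvG bs fj : Int)) ∣ fj := Int.gcd_dvd_left fj bs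

theorem pvG_mul_pvC {bs fj : Int} (hbs : 0 < bs) : pvG bs fj * pvC bs fj = bs.toNat := by
  have h : (pvG bs fj : Int) ∣ (bs.toNat : Int) := by
    rw [Int.toNat_of_nonneg (le_of_lt hbs)]; exact pvG_dvd_bs bs fj
  exact Nat.mul_div_cancel' (by exact_mod_cast h)

theorem pv_bs_eq {bs fj : Int} (hbs : 0 < bs) : bs = (pvG bs fj : Int) * (pvC bs fj : Int) := by
  have h := pvG_mul_pvC (fj := fj) hbs
  have h2 : ((pvG bs fj * pvC bs fj : Nat) : Int) = bs := by
    rw [h]; exact Int.toNat_of_nonneg (le_of_lt hbs)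
  push_cast at h2; omega

theorem pvC_pos {bs fj : Int} (hbs : 0 < bs) : 0 < pvC bs fj := by
  have h := pvG_mul_pvC (fj := fj) hbs
  rcases Nat.eq_zero_or_pos (pvC bs fj) with h0 | h0
  · rw [h0] at h; simp at h; omega
  · exact h0

theorem pvC_le {bs fj : Int} (hbs : 0 < bs) : pvC bs fj ≤ bs.toNat := by
  have h := pvG_mul_pvC (fj := fj) hbs
  nlinarith [pvG_pos (fj := fj) hbs, pvC_pos (fj := fj) hbs]

theorem pvG_le {bs fj : Int} (hbs : 0 < bs) : pvG bs fj ≤ bs.toNat := by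
  have h := pvG_mul_pvC (fj := fj) hbs
  nlinarith [pvG_pos (fj := fj) hbs, pvC_pos (fj := fj) hbs]

theorem pv_div_aux (g c : Nat) (b : Int) (hg : 0 < g) (hb : b = (g : Int) * (c : Int)) :
    b / (g : Int) = (c : Int) := by
  subst hb; exact Int.mul_ediv_cancel_left _ (by positivity)

theorem pv_dvd_aux (g c : Nat) (f' b f m : Int) (hg : 0 < g)
    (hb : b = (g : Int) * c) (hf : f = (g : Int) * f')
    (hcop : IsCoprime (c : Int) f') : b ∣ m * f ↔ (c : Int) ∣ m := by
  have hG0 : (g : Int) ≠ 0 := by positivity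
  constructor
  · intro h
    have h2 : (c : Int) ∣ m * f' := by
      rcases h with ⟨t, ht⟩
      refine ⟨t, mul_left_cancel₀ hG0 ?_⟩
      rw [hb, hf] at ht; linarith [ht]
    exact hcop.dvd_of_dvd_mul_right h2
  · rintro ⟨t, rfl⟩
    rw [hb, hf]; exact ⟨t * f', by ring⟩

theorem pv_dvd_iff {bs fj : Int} (hbs : 0 < bs) (m : Int) :
    bs ∣ m * fj ↔ ((pvC bs fj : Int)) ∣ m := by
  have hg : 0 < pvG bs fj := pvG_pos hbs
  have hG0 : (pvG bs fj : Int) ≠ 0 := by positivity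
  have hfj : fj = (pvG bs fj : Int) * (fj / (pvG bs fj : Int)) :=
    (Int.mul_ediv_cancel' (pvG_dvd_fj bs fj)).symm
  have e2 : bs / (pvG bs fj : Int) = (pvC bs fj : Int) :=
    pv_div_aux _ _ _ hg (pv_bs_eq hbs)
  have hcop : IsCoprime ((pvC bs fj : Int)) (fj / (pvG bs fj : Int)) := by
    rw [Int.isCoprime_iff_gcd_eq_one]
    have h := Int.gcd_div_gcd_div_gcd (i := fj) (j := bs) (by exact hg)
    have hgg : ((Int.gcd fj bs : Nat) : Int) = ((pvG bs fj : Nat) : Int) := rfl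
    rw [hgg, e2] at h
    rw [Int.gcd_comm]; exact h
  exact pv_dvd_aux (pvG bs fj) (pvC bs fj) _ bs fj m hg (pv_bs_eq hbs) hfj hcop

theorem pv_bs_dvd_c_fj {bs fj : Int} (hbs : 0 < bs) : bs ∣ (pvC bs fj : Int) * fj :=
  (pv_dvd_iff hbs _).2 dvd_rfl

theorem pvElt_nonneg {bs fj : Int} (hbs : 0 < bs) (r : Int) (k : Nat) : 0 ≤ pvElt bs fj r k :=
  Int.emod_nonneg _ (by omega)

theorem pvElt_lt {bs fj : Int} (hbs : 0 < bs) (r : Int) (k : Nat) : pvElt bs fj r k < bs :=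
  Int.emod_lt_of_pos _ hbs

theorem pv_add_dvd_emod (a b n : Int) (h : n ∣ b) : (a + b) % n = a % n := by
  obtain ⟨t, rfl⟩ := h
  rw [mul_comm]
  exact Int.add_mul_emod_self_right a t n

theorem pvElt_emod_g {bs fj : Int} (hbs : 0 < bs) (r : Int) (k : Nat) :
    (pvElt bs fj r k) % (pvG bs fj : Int) = r % (pvG bs fj : Int) := by
  unfold pvElt
  rw [Int.emod_emod_of_dvd _ (pvG_dvd_bs bs fj)]
  exact pv_add_dvd_emod _ _ _ (Dvd.dvd.mul_left (pvG_dvd_fj bs fj) _)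

theorem pvElt_step {bs fj : Int} (hbs : 0 < bs) (r : Int) (k : Nat) :
    (pvElt bs fj r k + fj) % bs = pvElt bs fj r (k + 1) := by
  unfold pvElt
  rw [Int.emod_add_emod]
  congr 1; push_cast; ring

theorem pvElt_zero {bs fj : Int} (r : Int) (h0 : 0 ≤ r) (h1 : r < bs) : pvElt bs fj r 0 = r := by
  unfold pvElt; simpa using Int.emod_eq_of_lt h0 h1

theorem pvElt_period {bs fj : Int} (hbs : 0 < bs) (r : Int) (h0 : 0 ≤ r) (h1 : r < bs) :
    pvElt bs fj r (pvC bs fj) = r := by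
  unfold pvElt
  rw [pv_add_dvd_emod _ _ _ (pv_bs_dvd_c_fj (fj := fj) hbs), Int.emod_eq_of_lt h0 h1]

theorem pvElt_inj {bs fj : Int} (hbs : 0 < bs) (r : Int) {k1 k2 : Nat}
    (h1 : k1 < pvC bs fj) (h2 : k2 < pvC bs fj)
    (he : pvElt bs fj r k1 = pvElt bs fj r k2) : k1 = k2 := by
  unfold pvElt at he
  have hd : bs ∣ ((k2 : Int) - k1) * fj := by
    have h3 := Int.ModEq.dvd (he : (r + (k1:Int)*fj) % bs = (r + (k2:Int)*fj) % bs)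
    rwa [show (r + (k2:Int)*fj) - (r + (k1:Int)*fj) = ((k2:Int) - k1) * fj by ring] at h3
  rw [pv_dvd_iff hbs] at hd
  have hc : (0 : Int) < (pvC bs fj : Int) := by exact_mod_cast pvC_pos (fj := fj) hbs
  have h0 : (k2 : Int) - k1 = 0 := Int.eq_zero_of_abs_lt_dvd hd (by rw [abs_lt]; omega)
  omega

theorem pvO_succ (bs fj : Int) (c m : Nat) :
    pvO bs fj c (m + 1) = pvO bs fj c m ++ pvCyc bs fj c (m : Int) := by
  unfold pvO
  rw [List.range_succ, List.map_append, List.flatten_append]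
  simp

theorem pvO_length {bs fj : Int} (hbs : 0 < bs) (m : Nat) :
    (pvO bs fj (pvC bs fj) m).length = m * pvC bs fj := by
  induction m with
  | zero => simp [pvO]
  | succ n ih =>
    rw [pvO_succ, List.length_append, ih]
    unfold pvCyc
    simp [Nat.succ_mul]

theorem pvCyc_mem {bs fj : Int} (c : Nat) (r x : Int) (hx : x ∈ pvCyc bs fj c r) :
    ∃ k, k < c ∧ x = pvElt bs fj r k := by
  unfold pvCyc at hx
  rw [List.mem_map] at hx
  obtain ⟨k, hk, rfl⟩ := hx
  exact ⟨k, List.mem_range.1 hk, rfl⟩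

theorem pvO_mem {bs fj : Int} (c m : Nat) (x : Int) (hx : x ∈ pvO bs fj c m) :
    ∃ r k, r < m ∧ k < c ∧ x = pvElt bs fj (r : Int) k := by
  unfold pvO at hx
  rw [List.mem_flatten] at hx
  obtain ⟨l, hl, hxl⟩ := hx
  rw [List.mem_map] at hl
  obtain ⟨r, hr, rfl⟩ := hl
  obtain ⟨k, hk, rfl⟩ := pvCyc_mem _ _ _ hxl
  exact ⟨r, k, List.mem_range.1 hr, hk, rfl⟩

-- elements of pvO m (m ≤ g) : bounds and residue < m
theorem pvO_elem_props {bs fj : Int} (hbs : 0 < bs) (m : Nat) (hm : m ≤ pvG bs fj)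
    (x : Int) (hx : x ∈ pvO bs fj (pvC bs fj) m) :
    0 ≤ x ∧ x < bs ∧ x % (pvG bs fj : Int) < (m : Int) := by
  obtain ⟨r, k, hr, hk, rfl⟩ := pvO_mem _ _ _ hx
  refine ⟨pvElt_nonneg hbs _ _, pvElt_lt hbs _ _, ?_⟩
  rw [pvElt_emod_g hbs]
  have hrg : (r : Int) < (pvG bs fj : Int) := by exact_mod_cast lt_of_lt_of_le hr hm
  rw [Int.emod_eq_of_lt (by positivity) hrg]
  exact_mod_cast hr

theorem pvO_nodup {bs fj : Int} (hbs : 0 < bs) (m : Nat) (hm : m ≤ pvG bs fj) :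
    (pvO bs fj (pvC bs fj) m).Nodup := by
  induction m with
  | zero => simp [pvO]
  | succ n ih =>
    rw [pvO_succ]
    have hn : n ≤ pvG bs fj := by omega
    refine List.Nodup.append (ih hn) ?_ ?_
    · -- cycle nodup
      unfold pvCyc
      refine List.Nodup.map_on ?_ (List.nodup_range)
      intro k1 h1 k2 h2 he
      exact pvElt_inj hbs _ (List.mem_range.1 h1) (List.mem_range.1 h2) he
    · -- disjoint: residues differ
      intro x hx hx2
      obtain ⟨-, -, hres⟩ := pvO_elem_props hbs n hn x hx
      obtain ⟨k, hk, rfl⟩ := pvCyc_mem _ _ _ hx2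
      rw [pvElt_emod_g hbs] at hres
      have hng : (n : Int) < (pvG bs fj : Int) := by exact_mod_cast lt_of_lt_of_le (Nat.lt_succ_self n) hm
      rw [Int.emod_eq_of_lt (by positivity) hng] at hres
      omega

theorem pvO_full {bs fj : Int} (hbs : 0 < bs) (x : Int) (h0 : 0 ≤ x) (h1 : x < bs) :
    x ∈ pvO bs fj (pvC bs fj) (pvG bs fj) := by
  set l := pvO bs fj (pvC bs fj) (pvG bs fj) with hl
  have hnd : l.Nodup := pvO_nodup hbs _ le_rfl
  have hlen : l.length = bs.toNat := by
    rw [hl, pvO_length hbs, pvG_mul_pvC hbs]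
  -- l ⊆ target list of all residues
  have hsub : l.toFinset ⊆ (Finset.range bs.toNat).image (fun n : Nat => (n : Int)) := by
    intro y hy
    rw [List.mem_toFinset] at hy
    obtain ⟨hy0, hy1, -⟩ := pvO_elem_props hbs _ le_rfl y hy
    rw [Finset.mem_image]
    exact ⟨y.toNat, Finset.mem_range.2 (by omega), by omega⟩
  have hcardT : ((Finset.range bs.toNat).image (fun n : Nat => (n : Int))).card = bs.toNat := by
    rw [Finset.card_image_of_injective _ (fun a b h => by exact_mod_cast h), Finset.card_range]
  have hcardl : l.toFinset.card = bs.toNat := by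
    rw [List.toFinset_card_of_nodup hnd, hlen]
  have heq := Finset.eq_of_subset_of_card_le hsub (by omega)
  have hxmem : x ∈ (Finset.range bs.toNat).image (fun n : Nat => (n : Int)) := by
    rw [Finset.mem_image]
    exact ⟨x.toNat, Finset.mem_range.2 (by omega), by omega⟩
  rw [← heq, List.mem_toFinset] at hxmem
  exact hxmem

-- ===== A-side walk =====
theorem pvTreeSet_contains_insert (t : Std.TreeSet Int) (v x : Int) :
    ((t.insert v).contains x = true) ↔ (x = v ∨ t.contains x = true) := by
  simp [Std.TreeSet.contains_insert]
  tauto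

theorem pvWalkA_run {bs fj : Int} (hbs : 0 < bs) (s : Nat) (hs : s < pvG bs fj)
    (Lpre : List Int) (hL : ∀ x ∈ Lpre, 0 ≤ x ∧ x < bs ∧ x % (pvG bs fj : Int) < (s : Int)) :
    ∀ (n j fuel : Nat), j + n = pvC bs fj → n < fuel →
    ∀ (seen : Std.TreeSet Int) (order : Array Int),
    order.toList = Lpre ++ (List.range j).map (pvElt bs fj (s : Int)) →
    (∀ x : Int, seen.contains x = true ↔ x ∈ order.toList) →
    (pvWalkA bs fj fuel seen order (pvElt bs fj (s : Int) j)).2.toList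
        = Lpre ++ pvCyc bs fj (pvC bs fj) (s : Int) ∧
    (∀ x : Int, (pvWalkA bs fj fuel seen order (pvElt bs fj (s : Int) j)).1.contains x = true
        ↔ x ∈ Lpre ++ pvCyc bs fj (pvC bs fj) (s : Int)) := by
  have hsbs : (s : Int) < bs := by
    have h1 := pvG_le (fj := fj) hbs
    omega
  have hs0 : (0 : Int) ≤ (s : Int) := by positivity
  intro n
  induction n with
  | zero =>
    intro j fuel hj hfuel seen order horder hseen
    have hj' : j = pvC bs fj := by omega
    subst hj'
    obtain ⟨f, rfl⟩ : ∃ f, fuel = f + 1 := ⟨fuel - 1, by omega⟩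
    rw [pvWalkA]
    have hcur : pvElt bs fj (s : Int) (pvC bs fj) = (s : Int) := pvElt_period hbs _ hs0 hsbs
    have hmem : (s : Int) ∈ order.toList := by
      rw [horder]
      refine List.mem_append.2 (Or.inr ?_)
      exact List.mem_map.2 ⟨0, List.mem_range.2 (pvC_pos hbs), pvElt_zero _ hs0 hsbs⟩
    rw [hcur, if_pos ((hseen _).2 hmem)]
    rw [horder]
    exact ⟨rfl, fun x => by rw [hseen x, horder]; rfl⟩
  | succ m ih =>
    intro j fuel hj hfuel seen order horder hseen
    have hjc : j < pvC bs fj := by omega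
    obtain ⟨f, rfl⟩ : ∃ f, fuel = f + 1 := ⟨fuel - 1, by omega⟩
    rw [pvWalkA]
    have hnmem : pvElt bs fj (s : Int) j ∉ order.toList := by
      rw [horder]
      intro hmem
      rcases List.mem_append.1 hmem with h | h
      · obtain ⟨-, -, hr⟩ := hL _ h
        rw [pvElt_emod_g hbs] at hr
        rw [Int.emod_eq_of_lt hs0 (by exact_mod_cast hs)] at hr
        omega
      · obtain ⟨k, hk, he⟩ := List.mem_map.1 h
        have := pvElt_inj hbs (s : Int) (lt_trans (List.mem_range.1 hk) hjc) hjc he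
        have := List.mem_range.1 hk
        omega
    rw [if_neg (fun h => hnmem ((hseen _).1 h))]
    have horder' : (order.push (pvElt bs fj (s : Int) j)).toList
        = Lpre ++ (List.range (j+1)).map (pvElt bs fj (s : Int)) := by
      rw [Array.toList_push, horder, List.range_succ, List.map_append, List.append_assoc]
      rfl
    have hseen' : ∀ x : Int, (seen.insert (pvElt bs fj (s : Int) j)).contains x = true
        ↔ x ∈ (order.push (pvElt bs fj (s : Int) j)).toList := by
      intro x
      rw [pvTreeSet_contains_insert, Array.toList_push, List.mem_append, hseen x, List.mem_singleton]
      tauto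
    have hstep : PySem.Int.mod (pvElt bs fj (s : Int) j + fj) bs = pvElt bs fj (s : Int) (j + 1) := by
      rw [PySem.Int.mod_eq_emod_of_pos hbs]
      exact pvElt_step hbs _ _
    rw [hstep]
    exact ih (j + 1) f (by omega) (by omega) _ _ horder' hseen'

-- M s and the outer-fold invariant
def pvM (bs fj : Int) (s : Nat) : List Int := pvO bs fj (pvC bs fj) (min s (pvG bs fj))

theorem pvM_zero (bs fj : Int) : pvM bs fj 0 = [] := by
  simp [pvM, pvO]

def pvInv (bs fj : Int) (s : Nat) (st : Std.TreeSet Int × Array Int) : Prop :=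
  st.2.toList = pvM bs fj s ∧ ∀ x : Int, st.1.contains x = true ↔ x ∈ st.2.toList

theorem pvFA_step {bs fj : Int} (hbs : 0 < bs) (s : Nat) (hsN : s < bs.toNat)
    (st : Std.TreeSet Int × Array Int) (h : pvInv bs fj s st) :
    pvInv bs fj (s + 1)
      (if st.1.contains ((s : Nat) : Int) then st
       else pvWalkA bs fj (bs.toNat + 1) st.1 st.2 ((s : Nat) : Int)) := by
  obtain ⟨horder, hseen⟩ := h
  by_cases hs : s < pvG bs fj
  · -- new cycle representative
    have hmin : min s (pvG bs fj) = s := by omega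
    have hmin1 : min (s+1) (pvG bs fj) = s + 1 := by omega
    have hL : ∀ x ∈ pvM bs fj s, 0 ≤ x ∧ x < bs ∧ x % (pvG bs fj : Int) < (s : Int) := by
      intro x hx
      unfold pvM at hx
      obtain ⟨h1, h2, h3⟩ := pvO_elem_props hbs _ (min_le_right _ _) x hx
      exact ⟨h1, h2, by rw [hmin] at h3; exact_mod_cast h3⟩
    have hnm : ((s : Nat) : Int) ∉ st.2.toList := by
      rw [horder]
      intro hmem
      obtain ⟨-, -, h3⟩ := hL _ hmem
      rw [Int.emod_eq_of_lt (by positivity) (by exact_mod_cast hs)] at h3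
      omega
    rw [if_neg (fun hc => hnm ((hseen _).1 hc))]
    have hz : ((s : Nat) : Int) = pvElt bs fj (s : Int) 0 := by
      rw [pvElt_zero _ (by positivity) (by omega)]
    have horder0 : st.2.toList = pvM bs fj s ++ (List.range 0).map (pvElt bs fj (s : Int)) := by
      simpa using horder
    have h := pvWalkA_run hbs s hs (pvM bs fj s) hL (pvC bs fj) 0 (bs.toNat + 1)
      (by omega) (by have := pvC_le (fj := fj) hbs; omega) st.1 st.2 horder0 hseen
    have h1 := h.1
    have h2 := h.2
    rw [← hz] at h1 h2
    refine ⟨?_, ?_⟩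
    · rw [h1]
      unfold pvM
      rw [hmin, hmin1, pvO_succ]
    · intro x
      rw [h2 x, h1]
  · -- already seen
    have hmin : min s (pvG bs fj) = pvG bs fj := by omega
    have hmin1 : min (s+1) (pvG bs fj) = pvG bs fj := by omega
    have hmem : ((s : Nat) : Int) ∈ st.2.toList := by
      rw [horder]
      unfold pvM
      rw [hmin]
      exact pvO_full hbs _ (by positivity) (by omega)
    rw [if_pos ((hseen _).2 hmem)]
    refine ⟨?_, hseen⟩
    rw [horder]
    unfold pvM
    rw [hmin, hmin1]

theorem pvFoldA_run {bs fj : Int} (hbs : 0 < bs) :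
    ∀ (j s : Nat), s + j = bs.toNat →
    ∀ st : Std.TreeSet Int × Array Int, pvInv bs fj s st →
    pvInv bs fj bs.toNat
      ((List.range' s j).foldl
        (fun (st : Std.TreeSet Int × Array Int) (k : Nat) =>
          if st.1.contains (k : Int) then st
          else pvWalkA bs fj (bs.toNat + 1) st.1 st.2 (k : Int)) st) := by
  intro j
  induction j with
  | zero =>
    intro s hs st h
    have : s = bs.toNat := by omega
    subst this
    simpa [List.range'] using h
  | succ m ih =>
    intro s hs st h
    rw [List.range'_succ, List.foldl_cons]
    exact ih (s + 1) (by omega) _ (pvFA_step hbs s (by omega) st h)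

theorem pvBuildModularOrder_eq {bs fj : Int} (hbs : 0 < bs) :
    pvBuildModularOrder bs fj = pvO bs fj (pvC bs fj) (pvG bs fj) := by
  obtain ⟨N, rfl⟩ : ∃ N : Nat, bs = (N : Int) := ⟨bs.toNat, by omega⟩
  unfold pvBuildModularOrder
  rw [PySem.List.pyRange_zero_natCast, List.foldl_map]
  simp only [Int.toNat_natCast]
  have h0 : pvInv (N : Int) fj 0 ((∅ : Std.TreeSet Int), (#[] : Array Int)) := by
    refine ⟨by simpa using (pvM_zero (N : Int) fj).symm, ?_⟩
    intro x; simp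
  rw [List.range_eq_range']
  have hrun := pvFoldA_run (bs := (N : Int)) (fj := fj) hbs N 0 (by simp) _ h0
  simp only [Int.toNat_natCast] at hrun
  rw [hrun.1]
  unfold pvM
  have hg := pvG_le (fj := fj) (bs := (N : Int)) hbs
  simp only [Int.toNat_natCast] at hg
  rw [show min N (pvG (N : Int) fj) = pvG (N : Int) fj by omega]

-- ===== B-side =====
theorem pvEuclid_nat : ∀ (b a : Nat), pvEuclid (a : Int) (b : Int) = (Nat.gcd b a : Int) := by
  intro b
  induction b using Nat.strong_induction_on with
  | _ b ih =>
    intro a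
    rw [pvEuclid]
    by_cases hb : b = 0
    · subst hb; simp
    · rw [dif_neg (by exact_mod_cast hb)]
      rw [PySem.Int.mod_natCast]
      rw [ih (a % b) (Nat.mod_lt _ (by omega))]
      rw [Nat.gcd_rec b a]

theorem pvEuclid_gcd {bs fj : Int} (hbs : 0 < bs) :
    pvEuclid (fj.natAbs : Int) bs = (pvG bs fj : Int) := by
  obtain ⟨N, rfl⟩ : ∃ N : Nat, bs = (N : Int) := ⟨bs.toNat, by omega⟩
  rw [pvEuclid_nat N fj.natAbs]
  unfold pvG
  rw [Int.gcd]
  simp [Nat.gcd_comm]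

theorem pvCycleLen_eq {bs fj : Int} (hbs : 0 < bs) :
    PySem.Int.floordiv bs (pvG bs fj : Int) = (pvC bs fj : Int) := by
  obtain ⟨N, rfl⟩ : ∃ N : Nat, bs = (N : Int) := ⟨bs.toNat, by omega⟩
  rw [PySem.Int.floordiv_natCast]
  unfold pvC
  simp

theorem pvOrderB_eq {bs fj : Int} (hbs : 0 < bs) :
    (PySem.List.pyRange 0 ((pvG bs fj : Nat) : Int) 1).flatMap
      (fun r => (PySem.List.pyRange 0 ((pvC bs fj : Nat) : Int) 1).map
        (fun k => PySem.Int.mod (r + k * fj) bs))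
      = pvO bs fj (pvC bs fj) (pvG bs fj) := by
  rw [PySem.List.pyRange_zero_natCast, PySem.List.pyRange_zero_natCast]
  unfold pvO pvCyc pvElt
  rw [List.flatMap_map, List.flatMap_def]
  congr 1
  apply List.map_congr_left
  intro r _
  rw [List.map_map]
  apply List.map_congr_left
  intro k _
  simp [PySem.Int.mod_eq_emod_of_pos hbs]

-- degenerate step: range(0, x, step) with step ≤ 0 and 0 ≤ x is empty
theorem pvRange_nonpos (x st : Int) (hx : 0 ≤ x) (hst : st ≤ 0) :
    PySem.List.pyRange 0 x st = [] := by
  unfold PySem.List.pyRange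
  split_ifs with h1 h2 h3 <;> simp_all <;> omega

theorem pv_AB_eq (stripe_idx : List Int) (forward_jump backward_jump : Int) :
    interlaced_block_reorder_py stripe_idx forward_jump backward_jump
      = interlaced_block_reorder_py_alt stripe_idx forward_jump backward_jump := by
  simp only [interlaced_block_reorder_py, interlaced_block_reorder_py_alt]
  by_cases h : forward_jump + backward_jump ≤ 0
  · rw [if_pos h]
    rw [pvRange_nonpos _ _ (by positivity) h]
    rfl
  · rw [not_le] at h
    rw [if_neg (by omega)]
    rw [pvBuildModularOrder_eq h, pvEuclid_gcd h, pvCycleLen_eq h, pvOrderB_eq h]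

-- ===== VERDICT (by name: the statement is the Claim_ definition above) =====
theorem interlaced_block_reorder_py_spec : Claim_equal_interlaced_block_reorder_py := by
  intro stripe_idx forward_jump backward_jump _ _
  unfold Spec_interlaced_block_reorder_py
  exact pv_AB_eq stripe_idx forward_jump backward_jump
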